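-- pv_equiv track=rewrite | github.com/Pranshugoyal/algo-ds-practice | python/Matrix.py | findMatrixPair
-- ===== SOURCE A (Python) =====
-- def findMatrixPair(M, n):
--     maxM = [[0]*n for i in range(n)]
--     maxM[-1][-1] = M[-1][-1]
--     res = None
--
--     #last row
--     for c in reversed(range(n-1)):
--         maxM[-1][c] = max(M[-1][c], maxM[-1][c+1])
--
--     #last column
--     for r in reversed(range(n-1)):
--         maxM[r][-1] = max(M[r][-1], maxM[r+1][-1])
--
--     #remaining matrix
--     for r in reversed(range(n-1)):
--         for c in reversed(range(n-1)):
--             if res is not None: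
--                 res = max(res, maxM[r+1][c+1] - M[r][c])
--             else:
--                 res = maxM[r+1][c+1] - M[r][c]
--             maxM[r][c] = max(M[r][c], maxM[r+1][c], maxM[r][c+1])
--     return res
-- ===== SOURCE B (Python) =====
-- def findMatrixPair(M, n):
--     # Recursive forward sweep over the rows, carrying the prefix-minimum row of the
--     # strict upper-left region (stock-profit style) and the running best difference.
--     def go(r, prev, res):
--         if r == n:
--             return res
--         row = M[r]
--         if r > 0:
--             for c in range(1, n):
--                 d = row[c] - prev[c - 1]
--                 if res is None or d > res:
--                     res = d
--         m = None
--         cur = []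
--         for c in range(n - 1):
--             m = row[c] if m is None else min(m, row[c])
--             cur.append(m if not prev else min(m, prev[c]))
--         return go(r + 1, cur, res)
--     return go(0, [], None)
-- ===== Notes on version B (the rewrite author's own statement) =====
-- stated objective: alternative
-- what changed: Replaces A's backward suffix-maximum DP (three boundary loops filling an n-by-n table of lower-right maxima, then best = maxM[r+1][c+1]-M[r][c]) with a recursive forward sweep that carries a prefix-minimum row of the strict upper-left region and takes best = M[r][c]-minUL[r-1][c-1] (stock-profit style): the dual recurrence (min over predecessors instead of max over successors), opposite traversal order, recursion over rows instead of nested index loops, and O(n) carried state instead of an n-by-n table.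
-- outside the precondition, e.g. on findMatrixPair([[1, 2], [3, 4]], 3): A returns 3, B raises IndexError
import Mathlib
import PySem

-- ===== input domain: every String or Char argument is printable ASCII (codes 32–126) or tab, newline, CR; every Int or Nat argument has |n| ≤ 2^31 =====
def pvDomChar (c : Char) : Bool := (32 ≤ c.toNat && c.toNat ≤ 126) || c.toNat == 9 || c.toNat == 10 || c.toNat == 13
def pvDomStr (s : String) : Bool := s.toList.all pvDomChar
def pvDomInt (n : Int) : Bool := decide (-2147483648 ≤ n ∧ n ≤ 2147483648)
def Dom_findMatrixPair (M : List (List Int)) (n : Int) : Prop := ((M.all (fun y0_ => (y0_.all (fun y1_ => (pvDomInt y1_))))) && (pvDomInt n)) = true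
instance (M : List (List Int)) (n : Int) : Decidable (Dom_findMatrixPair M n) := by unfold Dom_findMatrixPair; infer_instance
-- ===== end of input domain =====

-- B replaces A's backward suffix-maximum table (three boundary loops plus an interleaved scan of
-- maxM[r+1][c+1]-M[r][c]) with a forward sweep maintaining a prefix-minimum row of the strict
-- upper-left region and taking M[r][c] minus that minimum (stock-profit style), O(n) state.

-- ===== PORT A =====
-- t[i][j] read/write with Python index semantics (pyGetD/pySetD; in range under Pre_)
def pvGet (t : List (List Int)) (i j : Int) : Int :=
  PySem.List.pyGetD (PySem.List.pyGetD t i []) j 0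

def pvSet (t : List (List Int)) (i j : Int) (v : Int) : List (List Int) :=
  PySem.List.pySetD t i (PySem.List.pySetD (PySem.List.pyGetD t i []) j v)

def findMatrixPair (M : List (List Int)) (n : Int) : Option Int :=
  -- maxM = [[0]*n for i in range(n)]   ([0]*n repeats max(n,0) times = List.replicate n.toNat; exact)
  let maxM0 := (PySem.List.pyRange 0 n 1).map (fun _ => List.replicate n.toNat (0 : Int))
  -- maxM[-1][-1] = M[-1][-1]
  let maxM1 := pvSet maxM0 (-1) (-1) (pvGet M (-1) (-1))
  let res : Option Int := none
  -- for c in reversed(range(n-1)): maxM[-1][c] = max(M[-1][c], maxM[-1][c+1])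
  let maxM2 := ((PySem.List.pyRange 0 (n-1) 1).reverse).foldl
      (fun t c => pvSet t (-1) c (max (pvGet M (-1) c) (pvGet t (-1) (c+1)))) maxM1
  -- for r in reversed(range(n-1)): maxM[r][-1] = max(M[r][-1], maxM[r+1][-1])
  let maxM3 := ((PySem.List.pyRange 0 (n-1) 1).reverse).foldl
      (fun t r => pvSet t r (-1) (max (pvGet M r (-1)) (pvGet t (r+1) (-1)))) maxM2
  -- remaining matrix: interleaved res update and table fill
  let st := ((PySem.List.pyRange 0 (n-1) 1).reverse).foldl
      (fun (st : Option Int × List (List Int)) r =>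
        ((PySem.List.pyRange 0 (n-1) 1).reverse).foldl
          (fun (st : Option Int × List (List Int)) c =>
            let res' := match st.1 with
              | some v => some (max v (pvGet st.2 (r+1) (c+1) - pvGet M r c))
              | none => some (pvGet st.2 (r+1) (c+1) - pvGet M r c)
            (res', pvSet st.2 r c (max (max (pvGet M r c) (pvGet st.2 (r+1) c)) (pvGet st.2 r (c+1)))))
          st) (res, maxM3)
  st.1

-- ===== PORT B =====
-- go(r, prev, res): recursion over rows; Python's M[r] raises IndexError out of range — the
-- port stops with none there (exact under Pre_, where every reached index is in range)
def goB (M : List (List Int)) (n : Int) (prev : List Int) (res : Option Int) (r : Nat) : Option Int :=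
  if (r : Int) = n then res
  else
    match hrow : M[r]? with
    | none => none
    | some row =>
      -- if r > 0: for c in range(1, n): d = row[c] - prev[c-1]; res update
      let res1 :=
        if (r : Int) > 0 then
          (PySem.List.pyRange 1 n 1).foldl
            (fun res c =>
              let d := PySem.List.pyGetD row c 0 - PySem.List.pyGetD prev (c - 1) 0
              match res with
              | none => some d
              | some v => if d > v then some d else some v)
            res
        else res
      -- m = None; cur = []; for c in range(n-1): m = …; cur.append(m if not prev else min(m, prev[c]))
      let cur := (PySem.List.pyRange 0 (n - 1) 1).foldl
        (fun (p : Option Int × List Int) c =>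
          let mv := match p.1 with
            | none => PySem.List.pyGetD row c 0
            | some mm => min mm (PySem.List.pyGetD row c 0)
          (some mv, p.2 ++ [if prev.isEmpty then mv else min mv (PySem.List.pyGetD prev c 0)]))
        (none, ([] : List Int))
      goB M n cur.2 res1 (r + 1)
termination_by M.length - r
decreasing_by
  have : r < M.length := by
    by_contra h
    rw [List.getElem?_eq_none (by omega)] at hrow
    simp at hrow
  omega

def findMatrixPair_alt (M : List (List Int)) (n : Int) : Option Int :=
  goB M n [] none 0

-- ===== PRECONDITION & SPEC =====
-- Pre_ admits n = 1 with any matrix A accepts, and n ≥ 2 with n rows, rows 1..n-1 of length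
-- exactly n and row 0 of length ≥ n-1 (row 0 beyond column n-2 never influences the
-- result). A also RETURNS on other shapes via Python negative-index wraparound (an accident of
-- its implementation, see cites); those and the raising shapes are excluded.
def Pre_findMatrixPair (M : List (List Int)) (n : Int) : Prop :=
  (n = 1 ∧ M ≠ [] ∧ M.getD (M.length - 1) [] ≠ []) ∨
  (2 ≤ n ∧ (M.length : Int) = n ∧
    (∀ r, 1 ≤ r → r < M.length → ((M.getD r []).length : Int) = n) ∧
    n - 1 ≤ ((M.getD 0 []).length : Int))
instance (M : List (List Int)) (n : Int) : Decidable (Pre_findMatrixPair M n) := by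
  unfold Pre_findMatrixPair; infer_instance

def pvWitness_findMatrixPair : List (List Int) × Int := ([[1, 2], [3, 4]], 2)

def Spec_findMatrixPair (M : List (List Int)) (n : Int) (out : Option Int) : Prop := out = findMatrixPair_alt M n
instance (M : List (List Int)) (n : Int) (out : Option Int) : Decidable (Spec_findMatrixPair M n out) := by unfold Spec_findMatrixPair; infer_instance

-- ===== CLAIM (what is proved, stated in full; the proofs are below) =====
def Claim_equal_findMatrixPair : Prop := ∀ (M : List (List Int)) (n : Int), Dom_findMatrixPair M n → Pre_findMatrixPair M n → Spec_findMatrixPair M n (findMatrixPair M n)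

-- ===== LEMMAS AND PROOFS =====

-- cell getter on the Nat side
def gget (t : List (List Int)) (i j : Nat) : Int := (t.getD i []).getD j 0

-- suffix maximum of the submatrix with corner (r,c): A's maxM recurrence
def T (M : List (List Int)) (N r c : Nat) : Int :=
  if _h : r + 1 < M.length then
    if _h2 : c + 1 < N then
      max (gget M r c) (max (T M N (r + 1) c) (T M N r (c + 1)))
    else max (gget M r c) (T M N (r + 1) c)
  else
    if _h2 : c + 1 < N then max (gget M r c) (T M N r (c + 1))
    else gget M r c
termination_by (M.length - r) + (N - c)
decreasing_by all_goals omega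

-- prefix minimum of row prefix 0..c: B's running row minimum
def rowMin (row : List Int) : Nat → Int
  | 0 => row.getD 0 0
  | c + 1 => min (rowMin row c) (row.getD (c + 1) 0)

-- prefix minimum of the rectangle rows 0..r, cols 0..c: B's prev/cur recurrence
def P (M : List (List Int)) : Nat → Nat → Int
  | 0, c => rowMin (M.getD 0 []) c
  | r + 1, c => min (rowMin (M.getD (r + 1) []) c) (P M r c)

-- the candidate values scanned by A resp. B
def dval (M : List (List Int)) (m r c : Nat) : Int := T M (m + 1) (r + 1) (c + 1) - gget M r c
def eVal (M : List (List Int)) (a b : Nat) : Int := gget M (a + 1) (b + 1) - P M a b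

-- ---- bound / achievement lemmas for T and P ----
theorem rowMin_le (row : List Int) (b c : Nat) (h : b ≤ c) : rowMin row c ≤ row.getD b 0 := by
  induction c with
  | zero => have : b = 0 := by omega
            subst this; simp [rowMin]
  | succ c ih =>
    rw [rowMin]
    rcases Nat.lt_or_ge b (c + 1) with hb | hb
    · exact le_trans (min_le_left _ _) (ih (by omega))
    · have : b = c + 1 := by omega
      subst this; exact min_le_right _ _

theorem rowMin_achieves (row : List Int) (c : Nat) : ∃ b, b ≤ c ∧ rowMin row c = row.getD b 0 := by
  induction c with
  | zero => exact ⟨0, le_refl _, rfl⟩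
  | succ c ih =>
    obtain ⟨b, hb, hv⟩ := ih
    rw [rowMin]
    rcases le_total (rowMin row c) (row.getD (c + 1) 0) with h | h
    · exact ⟨b, by omega, by rw [min_eq_left h, hv]⟩
    · exact ⟨c + 1, le_refl _, by rw [min_eq_right h]⟩

theorem P_le_cell (M : List (List Int)) (r c a b : Nat) (ha : a ≤ r) (hb : b ≤ c) :
    P M r c ≤ gget M a b := by
  induction r with
  | zero => have : a = 0 := by omega
            subst this
            exact rowMin_le (M.getD 0 []) b c hb
  | succ r ih =>
    rw [P]
    rcases Nat.lt_or_ge a (r + 1) with h | h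
    · exact le_trans (min_le_right _ _) (ih (by omega))
    · have : a = r + 1 := by omega
      subst this
      exact le_trans (min_le_left _ _) (rowMin_le _ b c hb)

theorem P_achieves (M : List (List Int)) (r c : Nat) :
    ∃ a b, a ≤ r ∧ b ≤ c ∧ P M r c = gget M a b := by
  induction r with
  | zero =>
    obtain ⟨b, hb, hv⟩ := rowMin_achieves (M.getD 0 []) c
    exact ⟨0, b, le_refl _, hb, hv⟩
  | succ r ih =>
    obtain ⟨a, b, ha, hb, hv⟩ := ih
    rw [P]
    rcases le_total (rowMin (M.getD (r + 1) []) c) (P M r c) with h | h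
    · obtain ⟨b', hb', hv'⟩ := rowMin_achieves (M.getD (r + 1) []) c
      exact ⟨r + 1, b', le_refl _, hb', by rw [min_eq_left h, hv']; rfl⟩
    · exact ⟨a, b, by omega, hb, by rw [min_eq_right h, hv]⟩

theorem cell_le_T (M : List (List Int)) (m : Nat) (hlen : M.length = m + 1) :
    ∀ r c a b, r ≤ a → a ≤ m → c ≤ b → b ≤ m → gget M a b ≤ T M (m + 1) r c := by
  intro r c
  induction hk : (m - r) + (m - c) using Nat.strong_induction_on generalizing r c with
  | _ k ih =>
    intro a b hra ham hcb hbm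
    rw [T]
    by_cases h1 : r + 1 < M.length
    · by_cases h2 : c + 1 < m + 1
      · simp only [h1, dif_pos, h2, dif_pos]
        rcases Nat.lt_or_ge a (r + 1) with har | har
        · rcases Nat.lt_or_ge b (c + 1) with hbc | hbc
          · have : a = r ∧ b = c := by omega
            rw [this.1, this.2]
            exact le_max_left _ _
          · have := ih ((m - r) + (m - (c + 1))) (by omega) r (c + 1) rfl a b hra ham (by omega) hbm
            exact le_trans this (le_trans (le_max_right _ _) (le_max_right _ _))
        · have := ih ((m - (r + 1)) + (m - c)) (by omega) (r + 1) c rfl a b har ham hcb hbm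
          exact le_trans this (le_trans (le_max_left _ _) (le_max_right _ _))
      · simp only [h1, dif_pos, h2, dif_neg, not_false_iff]
        have hbc : b = c := by omega
        rcases Nat.lt_or_ge a (r + 1) with har | har
        · have : a = r := by omega
          rw [this, hbc]
          exact le_max_left _ _
        · have := ih ((m - (r + 1)) + (m - c)) (by omega) (r + 1) c rfl a b har ham hcb hbm
          exact le_trans this (le_max_right _ _)
    · have hra' : a = r := by omega
      by_cases h2 : c + 1 < m + 1
      · simp only [h1, dif_neg, not_false_iff, h2, dif_pos]
        rcases Nat.lt_or_ge b (c + 1) with hbc | hbc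
        · have : b = c := by omega
          rw [hra', this]
          exact le_max_left _ _
        · have := ih ((m - r) + (m - (c + 1))) (by omega) r (c + 1) rfl a b hra ham (by omega) hbm
          exact le_trans this (le_max_right _ _)
      · simp only [h1, dif_neg, not_false_iff, h2]
        have : b = c := by omega
        rw [hra', this]

theorem T_achieves (M : List (List Int)) (m : Nat) (hlen : M.length = m + 1) :
    ∀ r c, ∃ a b, r ≤ a ∧ a ≤ max r m ∧ c ≤ b ∧ b ≤ max c m ∧ T M (m + 1) r c = gget M a b := by
  intro r c
  induction hk : (m - r) + (m - c) using Nat.strong_induction_on generalizing r c with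
  | _ k ih =>
    rw [T]
    by_cases h1 : r + 1 < M.length
    · have hrm : r < m := by omega
      by_cases h2 : c + 1 < m + 1
      · simp only [h1, dif_pos, h2, dif_pos]
        obtain ⟨a1, b1, h11, h12, h13, h14, h15⟩ :=
          ih ((m - (r + 1)) + (m - c)) (by omega) (r + 1) c rfl
        obtain ⟨a2, b2, h21, h22, h23, h24, h25⟩ :=
          ih ((m - r) + (m - (c + 1))) (by omega) r (c + 1) rfl
        rcases le_total (T M (m + 1) (r + 1) c) (T M (m + 1) r (c + 1)) with h | h
        · rcases le_total (gget M r c) (T M (m + 1) r (c + 1)) with h' | h'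
          · refine ⟨a2, b2, by omega, by omega, by omega, by omega, ?_⟩
            rw [← h25]; omega
          · refine ⟨r, c, le_refl _, by omega, le_refl _, by omega, ?_⟩
            show max _ _ = gget M r c
            omega
        · rcases le_total (gget M r c) (T M (m + 1) (r + 1) c) with h' | h'
          · refine ⟨a1, b1, by omega, by omega, by omega, by omega, ?_⟩
            rw [← h15]; omega
          · refine ⟨r, c, le_refl _, by omega, le_refl _, by omega, ?_⟩
            show max _ _ = gget M r c
            omega
      · simp only [h1, dif_pos, h2, dif_neg, not_false_iff]
        obtain ⟨a1, b1, h11, h12, h13, h14, h15⟩ :=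
          ih ((m - (r + 1)) + (m - c)) (by omega) (r + 1) c rfl
        rcases le_total (gget M r c) (T M (m + 1) (r + 1) c) with h' | h'
        · refine ⟨a1, b1, by omega, by omega, by omega, by omega, ?_⟩
          rw [← h15]; omega
        · refine ⟨r, c, le_refl _, by omega, le_refl _, by omega, ?_⟩
          show max _ _ = gget M r c
          omega
    · by_cases h2 : c + 1 < m + 1
      · simp only [h1, dif_neg, not_false_iff, h2, dif_pos]
        obtain ⟨a2, b2, h21, h22, h23, h24, h25⟩ :=
          ih ((m - r) + (m - (c + 1))) (by omega) r (c + 1) rfl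
        rcases le_total (gget M r c) (T M (m + 1) r (c + 1)) with h' | h'
        · refine ⟨a2, b2, by omega, by omega, by omega, by omega, ?_⟩
          rw [← h25]; omega
        · refine ⟨r, c, le_refl _, by omega, le_refl _, by omega, ?_⟩
          show max _ _ = gget M r c
          omega
      · simp only [h1, dif_neg, not_false_iff, h2]
        exact ⟨r, c, le_refl _, le_max_left _ _, le_refl _, le_max_left _ _, rfl⟩

-- the two scans maximize the same set of pair differences
theorem bridge (M : List (List Int)) (m : Nat) (hlen : M.length = m + 1) (vA vB : Int)
    (hbA : ∀ r c, r < m → c < m → dval M m r c ≤ vA)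
    (haA : ∃ r c, r < m ∧ c < m ∧ vA = dval M m r c)
    (hbB : ∀ a b, a < m → b < m → eVal M a b ≤ vB)
    (haB : ∃ a b, a < m ∧ b < m ∧ vB = eVal M a b) : vA = vB := by
  apply le_antisymm
  · obtain ⟨r, c, hr, hc, hv⟩ := haA
    obtain ⟨a, b, h1, h2, h3, h4, h5⟩ := T_achieves M m hlen (r + 1) (c + 1)
    have ha2 : a ≤ m := by omega
    have hb2 : b ≤ m := by omega
    obtain ⟨a', rfl⟩ : ∃ a', a = a' + 1 := ⟨a - 1, by omega⟩
    obtain ⟨b', rfl⟩ : ∃ b', b = b' + 1 := ⟨b - 1, by omega⟩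
    have hp : P M a' b' ≤ gget M r c := P_le_cell M a' b' r c (by omega) (by omega)
    have he : vA ≤ eVal M a' b' := by
      rw [hv, dval, h5, eVal]; omega
    exact le_trans he (hbB a' b' (by omega) (by omega))
  · obtain ⟨a, b, ha, hb, hv⟩ := haB
    obtain ⟨r, c, hr, hc, hp⟩ := P_achieves M a b
    have ht : gget M (a + 1) (b + 1) ≤ T M (m + 1) (r + 1) (c + 1) :=
      cell_le_T M m hlen (r + 1) (c + 1) (a + 1) (b + 1) (by omega) (by omega) (by omega) (by omega)
    have he : vB ≤ dval M m r c := by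
      rw [hv, eVal, hp, dval]; omega
    exact le_trans he (hbA r c (by omega) (by omega))

-- ---- generic fold-invariant lemmas over (List.range k).map cast ----
theorem countdown1 {σ : Type} (f : σ → Int → σ) (Inv : Nat → σ → Prop) :
    ∀ (k : Nat) (s : σ), (∀ c s', c < k → Inv (c + 1) s' → Inv c (f s' (c : Int))) → Inv k s →
      Inv 0 ((((List.range k).map (Nat.cast : Nat → Int)).reverse).foldl f s) := by
  intro k
  induction k with
  | zero => intro s _ h; simpa using h
  | succ k ih =>
    intro s hstep hinv
    rw [List.range_succ, List.map_append, List.reverse_append]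
    simp only [List.map_cons, List.map_nil, List.reverse_cons, List.reverse_nil, List.nil_append,
      List.cons_append, List.foldl_cons]
    exact ih (f s k) (fun c s' hc => hstep c s' (by omega)) (hstep k s (by omega) hinv)

theorem countupG {σ : Type} (g : Nat → Int) (f : σ → Int → σ) (Inv : Nat → σ → Prop) :
    ∀ (k : Nat) (s : σ), (∀ c s', c < k → Inv c s' → Inv (c + 1) (f s' (g c))) → Inv 0 s →
      Inv k (((List.range k).map g).foldl f s) := by
  intro k
  induction k with
  | zero => intro s _ h; simpa using h
  | succ k ih =>
    intro s hstep hinv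
    rw [List.range_succ, List.map_append, List.foldl_append]
    simp only [List.map_cons, List.map_nil, List.foldl_cons, List.foldl_nil]
    exact hstep k _ (by omega) (ih s (fun c s' hc => hstep c s' (by omega)) hinv)

-- ---- index bridges (in-range, under Pre_) ----
theorem pySetD_neg_one (t : List (List Int)) (m : Nat) (x : List Int) (h : t.length = m + 1) :
    PySem.List.pySetD t (-1) x = t.set m x := by
  simp [PySem.List.pySetD, PySem.List.pySet?, PySem.List.pyIdx?, h]

theorem pyGetD_neg_one' {α : Type} (t : List α) (m : Nat) (d : α) (h : t.length = m + 1) :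
    PySem.List.pyGetD t (-1) d = t.getD m d := by
  simp [PySem.List.pyGetD, PySem.List.pyGet?, PySem.List.pyIdx?, h, List.getD]

theorem pySetD_inner_neg_one (row : List Int) (m : Nat) (v : Int) (h : row.length = m + 1) :
    PySem.List.pySetD row (-1) v = row.set m v := by
  simp [PySem.List.pySetD, PySem.List.pySet?, PySem.List.pyIdx?, h]

theorem getD_set_self' {α : Type} (l : List α) (a : Nat) (x : α) (d : α) (h : a < l.length) :
    (l.set a x).getD a d = x := by
  simp [List.getD, h]

theorem getD_set_ne' {α : Type} (l : List α) (a i : Nat) (x : α) (d : α) (h : i ≠ a) :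
    (l.set a x).getD i d = l.getD i d := by
  simp [List.getD, List.getElem?_set_ne (Ne.symm h)]

theorem getD_snoc_lt {α : Type} (l : List α) (x d : α) (i : Nat) (h : i < l.length) :
    (l ++ [x]).getD i d = l.getD i d := by
  simp [List.getD, List.getElem?_append_left h]

theorem getD_snoc_len {α : Type} (l : List α) (x d : α) :
    (l ++ [x]).getD l.length d = x := by
  simp [List.getD]

-- pvGet / pvSet bridges (indices in range)
theorem pvGet_cast (t : List (List Int)) (i j : Nat) : pvGet t (i : Int) (j : Int) = gget t i j := by
  simp [pvGet, gget]

theorem pvGet_row_neg (t : List (List Int)) (j m : Nat) (h : t.length = m + 1) :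
    pvGet t (-1) (j : Int) = gget t m j := by
  simp [pvGet, gget, pyGetD_neg_one' t m [] h]

theorem pvGet_corner_neg (t : List (List Int)) (m : Nat) (h : t.length = m + 1)
    (h2 : (t.getD m []).length = m + 1) : pvGet t (-1) (-1) = gget t m m := by
  rw [pvGet, pyGetD_neg_one' t m [] h, pyGetD_neg_one' _ m 0 h2, gget]

theorem pvGet_col_neg (t : List (List Int)) (i m : Nat) (h : (t.getD i []).length = m + 1) :
    pvGet t (i : Int) (-1) = gget t i m := by
  rw [pvGet, PySem.List.pyGetD_natCast, pyGetD_neg_one' _ m 0 h, gget]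

theorem pvSet_row_neg (t : List (List Int)) (j m : Nat) (v : Int) (h : t.length = m + 1) :
    pvSet t (-1) (j : Int) v = t.set m ((t.getD m []).set j v) := by
  rw [pvSet, pyGetD_neg_one' t m [] h, pySetD_neg_one t m _ h, PySem.List.pySetD_natCast]

theorem pvSet_corner_neg (t : List (List Int)) (m : Nat) (v : Int) (h : t.length = m + 1)
    (h2 : (t.getD m []).length = m + 1) :
    pvSet t (-1) (-1) v = t.set m ((t.getD m []).set m v) := by
  rw [pvSet, pyGetD_neg_one' t m [] h, pySetD_neg_one t m _ h, pySetD_inner_neg_one _ m v h2]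

theorem pvSet_col_neg (t : List (List Int)) (i m : Nat) (v : Int) (h : (t.getD i []).length = m + 1) :
    pvSet t (i : Int) (-1) v = t.set i ((t.getD i []).set m v) := by
  rw [pvSet, PySem.List.pyGetD_natCast, pySetD_inner_neg_one _ m v h, PySem.List.pySetD_natCast]

theorem pvSet_cast (t : List (List Int)) (i j : Nat) (v : Int) :
    pvSet t (i : Int) (j : Int) v = t.set i ((t.getD i []).set j v) := by
  simp [pvSet]

-- gget through a single-cell write
theorem gget_set (t : List (List Int)) (a b i j : Nat) (v : Int) (ha : a < t.length) :
    gget (t.set a ((t.getD a []).set b v)) i j =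
      if i = a then ((t.getD a []).set b v).getD j 0 else gget t i j := by
  by_cases hi : i = a
  · subst hi; rw [gget, getD_set_self' t i _ [] ha, if_pos rfl]
  · rw [gget, getD_set_ne' t a i _ [] hi, if_neg hi, gget]

theorem gget_set_self (t : List (List Int)) (a b : Nat) (v : Int) (ha : a < t.length)
    (hb : b < (t.getD a []).length) :
    gget (t.set a ((t.getD a []).set b v)) a b = v := by
  rw [gget_set t a b a b v ha, if_pos rfl, getD_set_self' _ b v 0 hb]

theorem gget_set_ne (t : List (List Int)) (a b i j : Nat) (v : Int) (ha : a < t.length)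
    (h : i ≠ a ∨ j ≠ b) :
    gget (t.set a ((t.getD a []).set b v)) i j = gget t i j := by
  rw [gget_set t a b i j v ha]
  by_cases hi : i = a
  · subst hi
    have hj : j ≠ b := h.resolve_left (by simp)
    rw [if_pos rfl, getD_set_ne' _ b j v 0 hj, gget]
  · rw [if_neg hi]

theorem rowlen_after_set (t : List (List Int)) (a b i : Nat) (v : Int) (N : Nat)
    (hlen' : t.length = N)
    (hall : ∀ i' < N, (t.getD i' []).length = N) (hi : i < N) :
    ((t.set a ((t.getD a []).set b v)).getD i []).length = N := by
  by_cases hia : i = a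
  · subst hia
    by_cases ha : i < t.length
    · rw [getD_set_self' t i _ [] ha]
      have := hall i (by omega)
      simpa [List.getD] using this
    · omega
  · rw [getD_set_ne' t a i _ [] hia]; exact hall i hi

-- range-list rewrites
theorem revRange_eq (m : Nat) :
    (PySem.List.pyRange 0 ((m : Nat) : Int) 1).reverse = ((List.range m).map (Nat.cast : Nat → Int)).reverse := by
  rw [PySem.List.pyRange_one]
  have h1 : (((m : Nat) : Int) - 0).toNat = m := by omega
  rw [h1]
  simp

theorem fwdRange_eq (m : Nat) :
    PySem.List.pyRange 0 ((m : Nat) : Int) 1 = (List.range m).map (Nat.cast : Nat → Int) := by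
  rw [PySem.List.pyRange_one]
  have h1 : (((m : Nat) : Int) - 0).toNat = m := by omega
  rw [h1]
  simp

theorem fwdRange1_eq (m : Nat) :
    PySem.List.pyRange 1 ((m + 1 : Nat) : Int) 1 = (List.range m).map (fun k : Nat => 1 + (k : Int)) := by
  rw [PySem.List.pyRange_one]
  have h1 : (((m + 1 : Nat) : Int) - 1).toNat = m := by omega
  rw [h1]

-- the fresh n×n zero table
theorem maxM0_len (N : Nat) :
    ((PySem.List.pyRange 0 ((N : Nat) : Int) 1).map (fun _ => List.replicate N (0 : Int))).length = N := by
  rw [PySem.List.pyRange_one]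
  simp

theorem maxM0_row (N i : Nat) (hi : i < N) :
    (((PySem.List.pyRange 0 ((N : Nat) : Int) 1).map (fun _ => List.replicate N (0 : Int))).getD i []) = List.replicate N (0 : Int) := by
  have hl := maxM0_len N
  rw [List.getD, List.getElem?_eq_getElem (by omega)]
  simp

def TblInv (m : Nat) (t : List (List Int)) : Prop :=
  t.length = m + 1 ∧ ∀ i < m + 1, (t.getD i []).length = m + 1

theorem loopRow_post (M : List (List Int)) (m : Nat) (hlen : M.length = m + 1)
    (t : List (List Int)) (ht : TblInv m t) (hc : gget t m m = T M (m + 1) m m) :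
    TblInv m (((List.map (Nat.cast : Nat → Int) (List.range m)).reverse).foldl
        (fun t c => pvSet t (-1) c (max (pvGet M (-1) c) (pvGet t (-1) (c + 1)))) t) ∧
    (∀ j < m + 1, gget (((List.map (Nat.cast : Nat → Int) (List.range m)).reverse).foldl
        (fun t c => pvSet t (-1) c (max (pvGet M (-1) c) (pvGet t (-1) (c + 1)))) t) m j
      = T M (m + 1) m j) := by
  have h := countdown1 (fun t c => pvSet t (-1) c (max (pvGet M (-1) c) (pvGet t (-1) (c + 1))))
    (fun c t => TblInv m t ∧ ∀ j, c ≤ j → j < m + 1 → gget t m j = T M (m + 1) m j) m t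
    ?step ⟨ht, fun j hj hj2 => by have hjm : j = m := by omega
                                  rw [hjm]; exact hc⟩
  · exact ⟨h.1, fun j hj => h.2 j (Nat.zero_le j) hj⟩
  · intro c t' hcm hinv
    dsimp only
    obtain ⟨⟨htl, htr⟩, hvals⟩ := hinv
    have hcast : ((c : Int) + 1) = ((c + 1 : Nat) : Int) := by push_cast; ring
    rw [pvSet_row_neg t' c m _ htl, pvGet_row_neg M c m hlen, hcast,
      pvGet_row_neg t' (c + 1) m htl]
    have hval : max (gget M m c) (gget t' m (c + 1)) = T M (m + 1) m c := by
      rw [hvals (c + 1) (le_refl _) (by omega)]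
      conv_rhs => rw [T]
      simp only [hlen]
      rw [dif_neg (by omega), dif_pos (by omega)]
    rw [hval]
    refine ⟨⟨by simp [htl], fun i hi => rowlen_after_set t' m c i _ (m + 1) htl htr (by omega)⟩,
      fun j hj hj2 => ?_⟩
    by_cases hjc : j = c
    · subst hjc
      rw [gget_set_self t' m j _ (by omega) (by rw [htr m (by omega)]; omega)]
    · rw [gget_set_ne t' m c m j _ (by omega) (Or.inr hjc)]
      exact hvals j (by omega) hj2

theorem loopCol_post (M : List (List Int)) (m : Nat) (hlen : M.length = m + 1)
    (hrows1 : ∀ i, 1 ≤ i → i < m + 1 → (M.getD i []).length = m + 1)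
    (t : List (List Int)) (ht : TblInv m t)
    (hrowm : ∀ j < m + 1, gget t m j = T M (m + 1) m j) :
    TblInv m (((List.map (Nat.cast : Nat → Int) (List.range m)).reverse).foldl
        (fun t r => pvSet t r (-1) (max (pvGet M r (-1)) (pvGet t (r + 1) (-1)))) t) ∧
    (∀ j < m + 1, gget (((List.map (Nat.cast : Nat → Int) (List.range m)).reverse).foldl
        (fun t r => pvSet t r (-1) (max (pvGet M r (-1)) (pvGet t (r + 1) (-1)))) t) m j
      = T M (m + 1) m j) ∧
    (∀ i, 1 ≤ i → i < m + 1 → gget (((List.map (Nat.cast : Nat → Int) (List.range m)).reverse).foldl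
        (fun t r => pvSet t r (-1) (max (pvGet M r (-1)) (pvGet t (r + 1) (-1)))) t) i m
      = T M (m + 1) i m) := by
  have h := countdown1 (fun t r => pvSet t r (-1) (max (pvGet M r (-1)) (pvGet t (r + 1) (-1))))
    (fun r t => TblInv m t ∧ (∀ j < m + 1, gget t m j = T M (m + 1) m j) ∧
      ∀ i, r ≤ i → i < m + 1 → 1 ≤ i → gget t i m = T M (m + 1) i m) m t
    ?step ⟨ht, hrowm, fun i hi hi2 _ => by have him : i = m := by omega
                                           rw [him]; exact hrowm m (by omega)⟩
  · exact ⟨h.1, h.2.1, fun i hi1 hi => h.2.2 i (Nat.zero_le i) hi hi1⟩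
  · intro r t' hrm hinv
    dsimp only
    obtain ⟨⟨htl, htr⟩, hrowm', hcols⟩ := hinv
    rw [pvSet_col_neg t' r m _ (htr r (by omega))]
    refine ⟨⟨by simp [htl], fun i hi => rowlen_after_set t' r m i _ (m + 1) htl htr hi⟩,
      fun j hj => ?_, fun i hi hi2 hi1 => ?_⟩
    · rw [gget_set_ne t' r m m j _ (by omega) (Or.inl (by omega))]
      exact hrowm' j hj
    · by_cases hir : i = r
      · subst hir
        rw [gget_set_self t' i m _ (by omega) (by rw [htr i (by omega)]; omega)]
        have hcast : ((i : Int) + 1) = ((i + 1 : Nat) : Int) := by push_cast; ring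
        rw [pvGet_col_neg M i m (hrows1 i hi1 (by omega)), hcast,
          pvGet_col_neg t' (i + 1) m (htr (i + 1) (by omega)),
          hcols (i + 1) (le_refl _) (by omega) (by omega)]
        conv_rhs => rw [T]
        simp only [hlen]
        rw [dif_pos (by omega), dif_neg (by omega)]
      · rw [gget_set_ne t' r m i m _ (by omega) (Or.inl hir)]
        exact hcols i (by omega) hi2 hi1

-- A's main loop: the running res is the max of all d-values, bounded and achieved
theorem mainLoopA (M : List (List Int)) (m : Nat) (hlen : M.length = m + 1) (hm1 : 1 ≤ m)
    (tA : List (List Int)) (htA : TblInv m tA)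
    (hrowm : ∀ j < m + 1, gget tA m j = T M (m + 1) m j)
    (hcolm : ∀ i, 1 ≤ i → i < m + 1 → gget tA i m = T M (m + 1) i m) :
    ∃ v, ((((List.range m).map (Nat.cast : Nat → Int)).reverse).foldl
      (fun (st : Option Int × List (List Int)) (r : Int) =>
        (((List.range m).map (Nat.cast : Nat → Int)).reverse).foldl
          (fun (st : Option Int × List (List Int)) (c : Int) =>
            (match st.1 with
              | some v => some (max v (pvGet st.2 (r + 1) (c + 1) - pvGet M r c))
              | none => some (pvGet st.2 (r + 1) (c + 1) - pvGet M r c),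
              pvSet st.2 r c (max (max (pvGet M r c) (pvGet st.2 (r + 1) c)) (pvGet st.2 r (c + 1)))))
          st) ((none : Option Int), tA)).1 = some v ∧
      (∀ r c, r < m → c < m → dval M m r c ≤ v) ∧
      (∃ r c, r < m ∧ c < m ∧ v = dval M m r c) := by
  have h := countdown1
    (fun (st : Option Int × List (List Int)) (r : Int) =>
        (((List.range m).map (Nat.cast : Nat → Int)).reverse).foldl
          (fun (st : Option Int × List (List Int)) (c : Int) =>
            (match st.1 with
              | some v => some (max v (pvGet st.2 (r + 1) (c + 1) - pvGet M r c))
              | none => some (pvGet st.2 (r + 1) (c + 1) - pvGet M r c),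
              pvSet st.2 r c (max (max (pvGet M r c) (pvGet st.2 (r + 1) c)) (pvGet st.2 r (c + 1)))))
          st)
    (fun r (st : Option Int × List (List Int)) =>
      (TblInv m st.2 ∧
       (∀ i j, max r 1 ≤ i → i < m + 1 → j < m + 1 → gget st.2 i j = T M (m + 1) i j) ∧
       (∀ i, 1 ≤ i → i < m + 1 → gget st.2 i m = T M (m + 1) i m)) ∧
      ((r = m ∧ st.1 = none) ∨ ∃ v, st.1 = some v ∧
        (∀ i j, r ≤ i → i < m → j < m → dval M m i j ≤ v) ∧
        (∃ i j, r ≤ i ∧ i < m ∧ j < m ∧ v = dval M m i j)))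
    m (none, tA) ?step
    ⟨⟨htA, fun i j hi1 hi2 hj => by
        have him : i = m := by omega
        subst him; exact hrowm j hj, hcolm⟩, Or.inl ⟨rfl, rfl⟩⟩
  · obtain ⟨_, hres⟩ := h
    rcases hres with ⟨h0, _⟩ | ⟨v, hv, hbnd, hach⟩
    · omega
    · exact ⟨v, hv, fun r c hr hc => hbnd r c (Nat.zero_le r) hr hc,
        by obtain ⟨i, j, _, hi, hj, he⟩ := hach; exact ⟨i, j, hi, hj, he⟩⟩
  · intro r st hrm hInv
    obtain ⟨⟨htbl, hrows, hcolI⟩, hres⟩ := hInv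
    dsimp only
    have hin := countdown1
      (fun (st' : Option Int × List (List Int)) (c : Int) =>
            (match st'.1 with
              | some v => some (max v (pvGet st'.2 ((r : Int) + 1) (c + 1) - pvGet M r c))
              | none => some (pvGet st'.2 ((r : Int) + 1) (c + 1) - pvGet M r c),
              pvSet st'.2 r c (max (max (pvGet M r c) (pvGet st'.2 ((r : Int) + 1) c)) (pvGet st'.2 r (c + 1)))))
      (fun c (st' : Option Int × List (List Int)) =>
        (TblInv m st'.2 ∧
         (∀ i j, r + 1 ≤ i → i < m + 1 → j < m + 1 → gget st'.2 i j = T M (m + 1) i j) ∧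
         (∀ i, 1 ≤ i → i < m + 1 → gget st'.2 i m = T M (m + 1) i m) ∧
         (1 ≤ r → ∀ j, c ≤ j → j < m + 1 → gget st'.2 r j = T M (m + 1) r j)) ∧
        ((r + 1 = m ∧ c = m ∧ st'.1 = none) ∨ ∃ v, st'.1 = some v ∧
          (∀ i j, r ≤ i → i < m → j < m → (i = r → c ≤ j) → dval M m i j ≤ v) ∧
          (∃ i j, r ≤ i ∧ i < m ∧ j < m ∧ (i = r → c ≤ j) ∧ v = dval M m i j)))
      m st ?instep
      ⟨⟨htbl, fun i j hi1 hi2 hj => hrows i j (by omega) hi2 hj, hcolI,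
        fun hr1 j hj1 hj2 => by
          have hjm : j = m := by omega
          subst hjm; exact hcolI r hr1 (by omega)⟩,
        by
          rcases hres with ⟨he, hn⟩ | ⟨v, hv, hbnd, hach⟩
          · exact Or.inl ⟨by omega, rfl, hn⟩
          · refine Or.inr ⟨v, hv, fun i j hi1 hi2 hj hc => hbnd i j (by omega) hi2 hj,
              ?_⟩
            obtain ⟨i, j, hi1, hi2, hj, he⟩ := hach
            exact ⟨i, j, by omega, hi2, hj, by omega, he⟩⟩
    obtain ⟨⟨htbl', hrows', hcolI', hrowr'⟩, hres'⟩ := hin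
    refine ⟨⟨htbl', fun i j hi1 hi2 hj => ?_, hcolI'⟩, ?_⟩
    · rcases Nat.lt_or_ge i (r + 1) with hi | hi
      · have hir : i = r := by omega
        subst hir
        exact hrowr' (by omega) j (Nat.zero_le j) hj
      · exact hrows' i j hi hi2 hj
    · rcases hres' with ⟨_, hc0, _⟩ | ⟨v, hv, hbnd, hach⟩
      · omega
      · refine Or.inr ⟨v, hv, fun i j hi1 hi2 hj => hbnd i j hi1 hi2 hj (by omega), ?_⟩
        obtain ⟨i, j, hi1, hi2, hj, _, he⟩ := hach
        exact ⟨i, j, hi1, hi2, hj, he⟩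
    intro c st' hcm hI
    obtain ⟨⟨⟨hsl, hsr⟩, hrows, hcolI, hrowr⟩, hres⟩ := hI
    dsimp only
    have hcast1 : ((r : Int) + 1) = ((r + 1 : Nat) : Int) := by push_cast; ring
    have hcast2 : ((c : Int) + 1) = ((c + 1 : Nat) : Int) := by push_cast; ring
    have hcand : pvGet st'.2 ((r : Int) + 1) ((c : Int) + 1) - pvGet M (r : Int) (c : Int)
        = dval M m r c := by
      rw [hcast1, hcast2, pvGet_cast, pvGet_cast,
        hrows (r + 1) (c + 1) (le_refl _) (by omega) (by omega), dval, gget]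
    have hwrite : pvSet st'.2 (r : Int) (c : Int)
        (max (max (pvGet M r c) (pvGet st'.2 ((r : Int) + 1) c)) (pvGet st'.2 r (c + 1)))
        = st'.2.set r ((st'.2.getD r []).set c
            (max (max (gget M r c) (gget st'.2 (r + 1) c)) (gget st'.2 r (c + 1)))) := by
      rw [hcast1, hcast2, pvGet_cast, pvGet_cast, pvGet_cast, pvSet_cast, gget]
    rw [hwrite]
    refine ⟨⟨⟨by simp [hsl], fun i hi => rowlen_after_set st'.2 r c i _ (m + 1) hsl hsr hi⟩,
      fun i j hi1 hi2 hj => ?_, fun i hi1 hi2 => ?_, fun hr1 j hj1 hj2 => ?_⟩, ?_⟩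
    · rw [gget_set_ne st'.2 r c i j _ (by omega) (Or.inl (by omega))]
      exact hrows i j hi1 hi2 hj
    · rw [gget_set_ne st'.2 r c i m _ (by omega) (Or.inr (by omega))]
      exact hcolI i hi1 hi2
    · by_cases hjc : j = c
      · subst hjc
        rw [gget_set_self st'.2 r j _ (by omega) (by rw [hsr r (by omega)]; omega)]
        rw [hrows (r + 1) j (le_refl _) (by omega) (by omega),
          hrowr hr1 (j + 1) (le_refl _) (by omega)]
        conv_rhs => rw [T]
        simp only [hlen]
        rw [dif_pos (by omega), dif_pos (by omega)]
        omega
      · rw [gget_set_ne st'.2 r c r j _ (by omega) (Or.inr hjc)]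
        exact hrowr hr1 j (by omega) hj2
    · rcases hres with ⟨hrm1, hcm1, hn⟩ | ⟨v, hv, hbnd, hach⟩
      · rw [hn]
        dsimp only
        rw [hcand]
        refine Or.inr ⟨dval M m r c, rfl, fun i j hi1 hi2 hj hc => ?_, r, c, le_refl _,
          by omega, by omega, fun _ => le_refl _, rfl⟩
        have : i = r ∧ j = c := by omega
        rw [this.1, this.2]
      · rw [hv]
        dsimp only
        rw [hcand]
        refine Or.inr ⟨max v (dval M m r c), rfl, fun i j hi1 hi2 hj hc => ?_, ?_⟩
        · by_cases hij : i = r ∧ j = c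
          · rw [hij.1, hij.2]; omega
          · have := hbnd i j hi1 hi2 hj (by omega)
            omega
        · rcases le_total v (dval M m r c) with hle | hle
          · exact ⟨r, c, le_refl _, by omega, by omega, fun _ => le_refl _, by omega⟩
          · obtain ⟨i, j, hi1, hi2, hj, hcj, he⟩ := hach
            exact ⟨i, j, hi1, hi2, hj, fun hir => by omega, by omega⟩

-- B's recursion: from a state summarizing rows < r, the sweep returns the max of all e-values
theorem goB_post (M : List (List Int)) (m : Nat) (hlen : M.length = m + 1) (hm1 : 1 ≤ m) :
    ∀ (k r : Nat) (prev : List Int) (res : Option Int), r + k = m + 1 →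
      ((r = 0 → prev = [] ∧ res = none) ∧
       (1 ≤ r → prev.length = m ∧ (∀ c, c < m → prev.getD c 0 = P M (r - 1) c) ∧
         ((r = 1 ∧ res = none) ∨ ∃ v, res = some v ∧
           (∀ a b, a + 1 < r → b < m → eVal M a b ≤ v) ∧
           (∃ a b, a + 1 < r ∧ b < m ∧ v = eVal M a b)))) →
      ∃ v, goB M ((m + 1 : Nat) : Int) prev res r = some v ∧
        (∀ a b, a < m → b < m → eVal M a b ≤ v) ∧
        (∃ a b, a < m ∧ b < m ∧ v = eVal M a b) := by
  intro k
  induction k with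
  | zero =>
    intro r prev res hk hInv
    have hr : r = m + 1 := by omega
    subst hr
    rw [goB, if_pos rfl]
    obtain ⟨hlenp, hP, hres⟩ := hInv.2 (by omega)
    rcases hres with ⟨h1, _⟩ | ⟨v, hv, hbnd, hach⟩
    · omega
    · refine ⟨v, hv, fun a b ha hb => hbnd a b (by omega) hb, ?_⟩
      obtain ⟨a, b, ha, hb, he⟩ := hach
      exact ⟨a, b, by omega, hb, he⟩
  | succ k ih =>
    intro r prev res hk hInv
    have hc1 : ((m + 1 : Nat) : Int) - 1 = ((m : Nat) : Int) := by push_cast; ring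
    have hrM : r < M.length := by omega
    rw [goB, if_neg (by exact_mod_cast (by omega : ¬ r = m + 1))]
    rw [List.getElem?_eq_getElem hrM]
    have hrow : M[r] = M.getD r [] := (List.getD_eq_getElem M [] hrM).symm
    dsimp only
    rw [hrow]
    simp only [hc1, fwdRange_eq, fwdRange1_eq]
    by_cases hr0 : r = 0
    · subst hr0
      obtain ⟨hprev, hresn⟩ := hInv.1 rfl
      subst hprev
      have hcur := countupG (Nat.cast : Nat → Int)
        (fun (p : Option Int × List Int) c =>
            (some (match p.1 with
              | none => PySem.List.pyGetD (M.getD 0 []) c 0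
              | some mm => min mm (PySem.List.pyGetD (M.getD 0 []) c 0)),
             p.2 ++ [if ([] : List Int).isEmpty then
                 (match p.1 with
                  | none => PySem.List.pyGetD (M.getD 0 []) c 0
                  | some mm => min mm (PySem.List.pyGetD (M.getD 0 []) c 0))
               else min (match p.1 with
                  | none => PySem.List.pyGetD (M.getD 0 []) c 0
                  | some mm => min mm (PySem.List.pyGetD (M.getD 0 []) c 0))
                 (PySem.List.pyGetD ([] : List Int) c 0)]))
        (fun j (p : Option Int × List Int) =>
          (j = 0 → p.1 = none) ∧ (1 ≤ j → p.1 = some (rowMin (M.getD 0 []) (j - 1))) ∧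
          p.2.length = j ∧ (∀ c, c < j → p.2.getD c 0 = P M 0 c))
        m ((none : Option Int), ([] : List Int)) ?cstep0
        ⟨fun _ => rfl, fun h1 => absurd h1 (by omega), rfl, fun c hc => absurd hc (by omega)⟩
      · refine ih 1 _ _ (by omega)
          ⟨fun h1 => absurd h1 (by omega), fun _ => ⟨hcur.2.2.1, fun c hc => hcur.2.2.2 c hc,
            Or.inl ⟨rfl, ?_⟩⟩⟩
        rw [if_neg (by norm_num)]
        exact hresn
      · intro j p hj hC
        obtain ⟨hn0, hs1, hlenj, hvals⟩ := hC
        dsimp only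
        have hmv : (match p.1 with
            | none => PySem.List.pyGetD (M.getD 0 []) ((j : Nat) : Int) 0
            | some mm => min mm (PySem.List.pyGetD (M.getD 0 []) ((j : Nat) : Int) 0))
            = rowMin (M.getD 0 []) j := by
          rcases Nat.eq_zero_or_pos j with hj0 | hj1
          · subst hj0
            rw [hn0 rfl]
            dsimp only
            rw [PySem.List.pyGetD_natCast]
            rfl
          · rw [hs1 (by omega)]
            dsimp only
            rw [PySem.List.pyGetD_natCast]
            have hjj : j = (j - 1) + 1 := by omega
            rw [hjj, rowMin]
            simp
        simp only [List.isEmpty_nil, if_pos]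
        rw [hmv]
        refine ⟨fun h1 => absurd h1 (by omega), fun _ => by simp, by simp [hlenj], fun c hc => ?_⟩
        rcases Nat.lt_or_ge c j with hcj | hcj
        · rw [getD_snoc_lt _ _ _ c (by omega)]
          exact hvals c hcj
        · have hcj' : c = j := by omega
          subst hcj'
          rw [← hlenj, getD_snoc_len]
          rfl
    · have hr1 : 1 ≤ r := by omega
      obtain ⟨hlenp, hP, hres⟩ := hInv.2 hr1
      obtain ⟨rr, rfl⟩ : ∃ rr, r = rr + 1 := ⟨r - 1, by omega⟩
      have hprevne : ¬ (prev.isEmpty = true) := by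
        intro hemp
        rw [List.isEmpty_iff] at hemp
        rw [hemp] at hlenp
        simp at hlenp
        omega
      have hcur := countupG (Nat.cast : Nat → Int)
        (fun (p : Option Int × List Int) c =>
            (some (match p.1 with
              | none => PySem.List.pyGetD (M.getD (rr + 1) []) c 0
              | some mm => min mm (PySem.List.pyGetD (M.getD (rr + 1) []) c 0)),
             p.2 ++ [if prev.isEmpty then
                 (match p.1 with
                  | none => PySem.List.pyGetD (M.getD (rr + 1) []) c 0
                  | some mm => min mm (PySem.List.pyGetD (M.getD (rr + 1) []) c 0))
               else min (match p.1 with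
                  | none => PySem.List.pyGetD (M.getD (rr + 1) []) c 0
                  | some mm => min mm (PySem.List.pyGetD (M.getD (rr + 1) []) c 0))
                 (PySem.List.pyGetD prev c 0)]))
        (fun j (p : Option Int × List Int) =>
          (j = 0 → p.1 = none) ∧ (1 ≤ j → p.1 = some (rowMin (M.getD (rr + 1) []) (j - 1))) ∧
          p.2.length = j ∧ (∀ c, c < j → p.2.getD c 0 = P M (rr + 1) c))
        m ((none : Option Int), ([] : List Int)) ?cstep1
        ⟨fun _ => rfl, fun h1 => absurd h1 (by omega), rfl, fun c hc => absurd hc (by omega)⟩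
      · -- answer fold characterization
        have hans := countupG (fun k : Nat => 1 + (k : Int))
          (fun res c =>
              match res with
              | none => some (PySem.List.pyGetD (M.getD (rr + 1) []) c 0 -
                  PySem.List.pyGetD prev (c - 1) 0)
              | some v => if PySem.List.pyGetD (M.getD (rr + 1) []) c 0 -
                    PySem.List.pyGetD prev (c - 1) 0 > v then
                  some (PySem.List.pyGetD (M.getD (rr + 1) []) c 0 -
                    PySem.List.pyGetD prev (c - 1) 0)
                else some v)
          (fun j (res : Option Int) =>
            (rr + 1 = 1 ∧ j = 0 ∧ res = none) ∨ ∃ v, res = some v ∧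
              (∀ a b, (a + 1 < rr + 1 ∧ b < m) ∨ (a + 1 = rr + 1 ∧ b < j) → eVal M a b ≤ v) ∧
              (∃ a b, ((a + 1 < rr + 1 ∧ b < m) ∨ (a + 1 = rr + 1 ∧ b < j)) ∧ v = eVal M a b))
          m res ?astep ?ainit
        · refine ih (rr + 1 + 1) _ _ (by omega)
            ⟨fun h1 => absurd h1 (by omega), fun _ => ⟨hcur.2.2.1, fun c hc => ?_, ?_⟩⟩
          · have := hcur.2.2.2 c hc
            simpa using this
          · have hpos : ((rr + 1 : Nat) : Int) > 0 := by positivity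
            rw [if_pos hpos]
            rcases hans with ⟨_, hj0, _⟩ | ⟨v, hv, hbnd, hach⟩
            · omega
            · refine Or.inr ⟨v, hv, fun a b ha hb => hbnd a b (by omega), ?_⟩
              obtain ⟨a, b, hab, he⟩ := hach
              exact ⟨a, b, by omega, by omega, he⟩
        · intro j res' hj hA
          dsimp only
          have hd : PySem.List.pyGetD (M.getD (rr + 1) []) (1 + (j : Int)) 0 -
              PySem.List.pyGetD prev (1 + (j : Int) - 1) 0 = eVal M rr j := by
            have e1 : (1 + (j : Int)) = ((j + 1 : Nat) : Int) := by push_cast; ring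
            rw [e1]
            have e2 : (((j + 1 : Nat) : Int) - 1) = ((j : Nat) : Int) := by push_cast; ring
            rw [e2, PySem.List.pyGetD_natCast, PySem.List.pyGetD_natCast,
              hP j (by omega), eVal]
            have : rr + 1 - 1 = rr := by omega
            rw [this, gget]
          rcases hA with ⟨hrr1, hj0, hrn⟩ | ⟨v, hv, hbnd, hach⟩
          · rw [hrn]
            dsimp only
            rw [hd]
            refine Or.inr ⟨eVal M rr j, rfl, fun a b hab => ?_, rr, j, Or.inr ⟨rfl, by omega⟩, rfl⟩
            have : a = rr ∧ b = j := by omega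
            rw [this.1, this.2]
          · rw [hv]
            dsimp only
            rw [hd]
            by_cases hgt : eVal M rr j > v
            · rw [if_pos hgt]
              refine Or.inr ⟨eVal M rr j, rfl, fun a b hab => ?_, rr, j, Or.inr ⟨rfl, by omega⟩, rfl⟩
              rcases hab with ⟨ha, hb⟩ | ⟨ha, hb⟩
              · have := hbnd a b (Or.inl ⟨ha, hb⟩); omega
              · rcases Nat.lt_or_ge b j with hbj | hbj
                · have := hbnd a b (Or.inr ⟨ha, hbj⟩); omega
                · have : a = rr ∧ b = j := by omega
                  rw [this.1, this.2]
            · rw [if_neg hgt]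
              refine Or.inr ⟨v, rfl, fun a b hab => ?_, ?_⟩
              · rcases hab with ⟨ha, hb⟩ | ⟨ha, hb⟩
                · exact hbnd a b (Or.inl ⟨ha, hb⟩)
                · rcases Nat.lt_or_ge b j with hbj | hbj
                  · exact hbnd a b (Or.inr ⟨ha, hbj⟩)
                  · have : a = rr ∧ b = j := by omega
                    rw [this.1, this.2]; omega
              · obtain ⟨a, b, hab, he⟩ := hach
                refine ⟨a, b, ?_, he⟩
                rcases hab with h' | h'
                · exact Or.inl h'
                · exact Or.inr ⟨h'.1, by omega⟩
        · rcases hres with ⟨h1, hn⟩ | ⟨v, hv, hbnd, hach⟩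
          · exact Or.inl ⟨h1, rfl, hn⟩
          · refine Or.inr ⟨v, hv, fun a b hab => ?_, ?_⟩
            · rcases hab with ⟨ha, hb⟩ | ⟨ha, hb⟩
              · exact hbnd a b ha hb
              · omega
            · obtain ⟨a, b, ha, hb, he⟩ := hach
              exact ⟨a, b, Or.inl ⟨ha, hb⟩, he⟩
      · intro j p hj hC
        obtain ⟨hn0, hs1, hlenj, hvals⟩ := hC
        dsimp only
        have hmv : (match p.1 with
            | none => PySem.List.pyGetD (M.getD (rr + 1) []) ((j : Nat) : Int) 0
            | some mm => min mm (PySem.List.pyGetD (M.getD (rr + 1) []) ((j : Nat) : Int) 0))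
            = rowMin (M.getD (rr + 1) []) j := by
          rcases Nat.eq_zero_or_pos j with hj0 | hj1
          · subst hj0
            rw [hn0 rfl]
            dsimp only
            rw [PySem.List.pyGetD_natCast]
            rfl
          · rw [hs1 (by omega)]
            dsimp only
            rw [PySem.List.pyGetD_natCast]
            have hjj : j = (j - 1) + 1 := by omega
            rw [hjj, rowMin]
            simp
        rw [if_neg hprevne, hmv]
        refine ⟨fun h1 => absurd h1 (by omega), fun _ => by simp, by simp [hlenj], fun c hc => ?_⟩
        rcases Nat.lt_or_ge c j with hcj | hcj
        · rw [getD_snoc_lt _ _ _ c (by omega)]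
          exact hvals c hcj
        · have hcj' : c = j := by omega
          subst hcj'
          rw [← hlenj, getD_snoc_len, PySem.List.pyGetD_natCast, hP _ (by omega)]
          have : rr + 1 - 1 = rr := by omega
          rw [this, P]

theorem B_char (M : List (List Int)) (m : Nat) (hlen : M.length = m + 1) (hm1 : 1 ≤ m) :
    ∃ v, findMatrixPair_alt M ((m + 1 : Nat) : Int) = some v ∧
      (∀ a b, a < m → b < m → eVal M a b ≤ v) ∧
      (∃ a b, a < m ∧ b < m ∧ v = eVal M a b) := by
  unfold findMatrixPair_alt
  exact goB_post M m hlen hm1 (m + 1) 0 [] none (by omega)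
    ⟨fun _ => ⟨rfl, rfl⟩, fun h1 => absurd h1 (by omega)⟩

theorem A_char (M : List (List Int)) (m : Nat) (hlen : M.length = m + 1) (hm1 : 1 ≤ m)
    (hrows1 : ∀ i, 1 ≤ i → i < m + 1 → (M.getD i []).length = m + 1) :
    ∃ v, findMatrixPair M ((m + 1 : Nat) : Int) = some v ∧
      (∀ r c, r < m → c < m → dval M m r c ≤ v) ∧
      (∃ r c, r < m ∧ c < m ∧ v = dval M m r c) := by
  have hc1 : ((m + 1 : Nat) : Int) - 1 = ((m : Nat) : Int) := by push_cast; ring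
  unfold findMatrixPair
  simp only [hc1, revRange_eq m, Int.toNat_natCast]
  set M0 : List (List Int) :=
    List.map (fun _ => List.replicate (m + 1) (0 : Int))
      (PySem.List.pyRange 0 ((m + 1 : Nat) : Int) 1) with hM0
  have hm0len : M0.length = m + 1 := maxM0_len (m + 1)
  have hm0row : ∀ i < m + 1, (M0.getD i []).length = m + 1 := by
    intro i hi
    rw [hM0, maxM0_row (m + 1) i hi]
    simp
  set t1 : List (List Int) := pvSet M0 (-1) (-1) (pvGet M (-1) (-1)) with ht1
  have ht1eq : t1 = M0.set m ((M0.getD m []).set m (gget M m m)) := by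
    rw [ht1, pvGet_corner_neg M m hlen (hrows1 m hm1 (by omega)),
      pvSet_corner_neg M0 m _ hm0len (hm0row m (by omega))]
  have ht1inv : TblInv m t1 := by
    rw [ht1eq]
    exact ⟨by simp [hm0len], fun i hi => rowlen_after_set M0 m m i _ (m + 1) hm0len hm0row hi⟩
  have hcorner : gget t1 m m = T M (m + 1) m m := by
    rw [ht1eq, gget_set_self M0 m m _ (by omega) (by rw [hm0row m (by omega)]; omega)]
    conv_rhs => rw [T]
    simp only [hlen]
    rw [dif_neg (by omega), dif_neg (by omega)]
  have hA1 := loopRow_post M m hlen t1 ht1inv hcorner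
  have hA2 := loopCol_post M m hlen hrows1 _ hA1.1 hA1.2
  exact mainLoopA M m hlen hm1 _ hA2.1 hA2.2.1 hA2.2.2

theorem one_A (M : List (List Int)) : findMatrixPair M 1 = none := by
  unfold findMatrixPair
  have h1 : (1 : Int) - 1 = 0 := by norm_num
  rw [h1, PySem.List.pyRange_one_eq_nil (le_refl 0)]
  simp

theorem one_B (M : List (List Int)) (hM : M ≠ []) : findMatrixPair_alt M 1 = none := by
  unfold findMatrixPair_alt
  have h0 : 0 < M.length := List.length_pos_iff.mpr hM
  rw [goB, if_neg (by norm_num), List.getElem?_eq_getElem h0]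
  dsimp only
  rw [goB, if_pos (by norm_num)]
  rw [if_neg (by norm_num)]

theorem main_eq (M : List (List Int)) (m : Nat) (hlen : M.length = m + 1) (hm1 : 1 ≤ m)
    (hrows1 : ∀ i, 1 ≤ i → i < m + 1 → (M.getD i []).length = m + 1) :
    findMatrixPair M ((m + 1 : Nat) : Int) = findMatrixPair_alt M ((m + 1 : Nat) : Int) := by
  obtain ⟨vA, hAe, hbA, haA⟩ := A_char M m hlen hm1 hrows1
  obtain ⟨vB, hBe, hbB, haB⟩ := B_char M m hlen hm1
  rw [hAe, hBe, bridge M m hlen vA vB hbA haA hbB haB]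

-- ===== VERDICT (by name: the statement is the Claim_ definition above) =====
theorem findMatrixPair_spec : Claim_equal_findMatrixPair := by
  unfold Claim_equal_findMatrixPair
  intro M n _dom hpre
  unfold Spec_findMatrixPair
  rcases hpre with ⟨h1, hne, _⟩ | ⟨hn2, hlen, hrow1, _⟩
  · rw [h1, one_A, one_B M hne]
  · obtain ⟨m, hm⟩ : ∃ m, M.length = m + 1 := ⟨M.length - 1, by omega⟩
    have hne : n = ((m + 1 : Nat) : Int) := by rw [← hlen, hm]
    have hm1 : 1 ≤ m := by omega
    have hrows1 : ∀ i, 1 ≤ i → i < m + 1 → (M.getD i []).length = m + 1 := by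
      intro i hi1 hi
      have := hrow1 i (by exact_mod_cast hi1) (by omega)
      rw [hne] at this
      exact_mod_cast this
    rw [hne]
    exact main_eq M m hm hm1 hrows1
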